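-- pv_equiv track=rewrite | github.com/laxmi-narayana-g/graduation | graduation_ceremony.py | graduation_ceremony
-- ===== SOURCE A (Python) =====
-- def graduation_ceremony(day):
--     """
--     This method is used to calculate the probability of a student not attending the graduation ceremony.
--     :param day: number of days.
--     :return: string of The result.(probability of missing graduation ceremony / number of ways to attend classes)
--     """
--     result = ""
--     loop_starting = 4
--     if day:
--         if day < loop_starting:
--             result = str(2 ** (day - 1)) + '/' + str(2 ** day)
--         else:
--             a = 2
--             aa = 1
--             aaa = 1
--             p = 4
--             count = 8
--             for _ in range(loop_starting, day + 1):
--                 temp = aaa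
--                 aaa = aa
--                 aa = a
--                 a = p
--                 p = count
--                 count = (count) * 2 - temp
--             result = str(aaa + aa + a) + '/' + str(count)
--     return result
-- ===== SOURCE B (Python) =====
-- def _mul(x, y):
--     (a, b, c, d, e, f, g, h, i, j, k, l, m, n, o, p) = x
--     (A, B, C, D, E, F, G, H, I, J, K, L, M, N, O, P) = y
--     return (a*A + b*E + c*I + d*M, a*B + b*F + c*J + d*N, a*C + b*G + c*K + d*O, a*D + b*H + c*L + d*P,
--             e*A + f*E + g*I + h*M, e*B + f*F + g*J + h*N, e*C + f*G + g*K + h*O, e*D + f*H + g*L + h*P,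
--             i*A + j*E + k*I + l*M, i*B + j*F + k*J + l*N, i*C + j*G + k*K + l*O, i*D + j*H + k*L + l*P,
--             m*A + n*E + o*I + p*M, m*B + n*F + o*J + p*N, m*C + n*G + o*K + p*O, m*D + n*H + o*L + p*P)
--
--
-- def _pow(m, e):
--     r = (1, 0, 0, 0, 0, 1, 0, 0, 0, 0, 1, 0, 0, 0, 0, 1)
--     while e > 0:
--         if e & 1:
--             r = _mul(r, m)
--         m = _mul(m, m)
--         e >>= 1
--     return r
--
--
-- def graduation_ceremony(day):
--     if not day:
--         return ""
--     # q = tetranacci 1,1,2,4,8,15,...: M^(day-1) applied to (q3,q2,q1,q0)=(4,2,1,1)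
--     # yields (q(day+2), q(day+1), q(day), q(day-1)); answer = (q(day+1)-q(day)) / q(day+1)
--     w = _pow((1, 1, 1, 1, 1, 0, 0, 0, 0, 1, 0, 0, 0, 0, 1, 0), day - 1)
--     den = w[4] * 4 + w[5] * 2 + w[6] + w[7]
--     num = den - (w[8] * 4 + w[9] * 2 + w[10] + w[11])
--     return str(num) + "/" + str(den)
-- ===== Notes on version B (the rewrite author's own statement) =====
-- stated objective: faster
-- what changed: Replaces A's day-long linear iteration of the recurrence by binary exponentiation of the fixed 4x4 tetranacci companion matrix (the answer is (q(day+1)-q(day))/q(day+1) for the tetranacci q), covering the small-day branch by the same formula.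
-- outside the precondition, e.g. on graduation_ceremony(-1): A returns '0.25/0.5', B returns '1/2'
import Mathlib
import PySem

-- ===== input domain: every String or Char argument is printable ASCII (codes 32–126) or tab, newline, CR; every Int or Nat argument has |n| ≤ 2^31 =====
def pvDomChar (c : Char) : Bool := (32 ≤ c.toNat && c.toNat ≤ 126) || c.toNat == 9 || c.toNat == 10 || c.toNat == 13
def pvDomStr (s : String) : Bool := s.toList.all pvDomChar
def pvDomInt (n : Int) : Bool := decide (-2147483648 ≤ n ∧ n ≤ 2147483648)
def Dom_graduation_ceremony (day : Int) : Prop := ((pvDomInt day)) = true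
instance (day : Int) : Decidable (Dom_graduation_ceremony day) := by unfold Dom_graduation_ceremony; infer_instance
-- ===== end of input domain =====

-- B replaces A's day-long iteration of the recurrence by binary exponentiation of the
-- fixed 4x4 tetranacci companion matrix (objective: faster, asymptotically fewer bignum ops).

-- ===== PORT A =====
-- the loop body of A: state (a, aa, aaa, p, count) ↦ (p, a, aa, count, count*2 - temp), temp = aaa
def aStep (s : Int × Int × Int × Int × Int) (_x : Int) : Int × Int × Int × Int × Int :=
  match s with
  | (a, aa, aaa, p, count) => (p, a, aa, count, count * 2 - aaa)

def graduation_ceremony (day : Int) : String :=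
  if day ≠ 0 then
    if day < 4 then
      -- 2 ** (day - 1): exact for 1 ≤ day (Pre_); for day < 0 Python computes floats (excluded by Pre_)
      PySem.Int.toStr (2 ^ (day - 1).toNat) ++ "/" ++ PySem.Int.toStr (2 ^ day.toNat)
    else
      let st := (PySem.List.pyRange 4 (day + 1) 1).foldl aStep (2, 1, 1, 4, 8)
      PySem.Int.toStr (st.2.2.1 + st.2.1 + st.1) ++ "/" ++ PySem.Int.toStr st.2.2.2.2
  else ""

-- ===== PORT B =====
structure M4 where
  a : Int
  b : Int
  c : Int
  d : Int
  e : Int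
  f : Int
  g : Int
  h : Int
  i : Int
  j : Int
  k : Int
  l : Int
  m : Int
  n : Int
  o : Int
  p : Int
deriving DecidableEq, Repr

-- Source B's _mul on flat 16-tuples (row-major 4x4)
def m4Mul (x y : M4) : M4 :=
  ⟨x.a*y.a + x.b*y.e + x.c*y.i + x.d*y.m, x.a*y.b + x.b*y.f + x.c*y.j + x.d*y.n,
   x.a*y.c + x.b*y.g + x.c*y.k + x.d*y.o, x.a*y.d + x.b*y.h + x.c*y.l + x.d*y.p,
   x.e*y.a + x.f*y.e + x.g*y.i + x.h*y.m, x.e*y.b + x.f*y.f + x.g*y.j + x.h*y.n,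
   x.e*y.c + x.f*y.g + x.g*y.k + x.h*y.o, x.e*y.d + x.f*y.h + x.g*y.l + x.h*y.p,
   x.i*y.a + x.j*y.e + x.k*y.i + x.l*y.m, x.i*y.b + x.j*y.f + x.k*y.j + x.l*y.n,
   x.i*y.c + x.j*y.g + x.k*y.k + x.l*y.o, x.i*y.d + x.j*y.h + x.k*y.l + x.l*y.p,
   x.m*y.a + x.n*y.e + x.o*y.i + x.p*y.m, x.m*y.b + x.n*y.f + x.o*y.j + x.p*y.n,
   x.m*y.c + x.n*y.g + x.o*y.k + x.p*y.o, x.m*y.d + x.n*y.h + x.o*y.l + x.p*y.p⟩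

def m4Id : M4 := ⟨1,0,0,0, 0,1,0,0, 0,0,1,0, 0,0,0,1⟩
def m4M : M4 := ⟨1,1,1,1, 1,0,0,0, 0,1,0,0, 0,0,1,0⟩

-- Source B's _pow loop (r accumulator, square-and-multiply); the extra fuel argument (= initial e)
-- only makes the same computation structurally recursive, it never cuts it short (fuel ≥ e).
def m4PowAux : Nat → M4 → M4 → Nat → M4
  | 0, r, _, _ => r
  | fuel + 1, r, m, e =>
    if e = 0 then r
    else m4PowAux fuel (if e % 2 = 1 then m4Mul r m else r) (m4Mul m m) (e / 2)

def graduation_ceremony_alt (day : Int) : String :=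
  if day = 0 then ""
  else
    -- e = day - 1; for day ≥ 1 (Pre_) .toNat is exact; for day < 0 Python's `while e > 0`
    -- never runs, matching .toNat = 0
    let e := (day - 1).toNat
    let w := m4PowAux e m4Id m4M e
    let den := w.e * 4 + w.f * 2 + w.g + w.h
    let num := den - (w.i * 4 + w.j * 2 + w.k + w.l)
    PySem.Int.toStr num ++ "/" ++ PySem.Int.toStr den

-- ===== PRECONDITION & SPEC =====
-- Pre_ excludes day < 0, where Python A computes float powers 2**(day-1) and returns a
-- float-formatted string (e.g. '0.25/0.5'), outside the Int/String semantics of the port.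
def Pre_graduation_ceremony (day : Int) : Prop := 0 ≤ day
instance (day : Int) : Decidable (Pre_graduation_ceremony day) := by unfold Pre_graduation_ceremony; infer_instance
def pvWitness_graduation_ceremony : Int := (6)

def Spec_graduation_ceremony (day : Int) (out : String) : Prop := out = graduation_ceremony_alt day
instance (day : Int) (out : String) : Decidable (Spec_graduation_ceremony day out) := by unfold Spec_graduation_ceremony; infer_instance

-- ===== CLAIM (what is proved, stated in full; the proofs are below) =====
def Claim_equal_graduation_ceremony : Prop := ∀ (day : Int), Dom_graduation_ceremony day → Pre_graduation_ceremony day → Spec_graduation_ceremony day (graduation_ceremony day)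

-- ===== LEMMAS AND PROOFS =====

-- the tetranacci sequence 1, 1, 2, 4, 8, 15, 29, 56, 108, …
def q : Nat → Int
  | 0 => 1
  | 1 => 1
  | 2 => 2
  | 3 => 4
  | n + 4 => q (n + 3) + q (n + 2) + q (n + 1) + q n

def m4Pow (m : M4) : Nat → M4
  | 0 => m4Id
  | e + 1 => m4Mul m (m4Pow m e)

theorem m4Mul_id_left (x : M4) : m4Mul m4Id x = x := by
  cases x; simp [m4Mul, m4Id]

theorem m4Mul_id_right (x : M4) : m4Mul x m4Id = x := by
  cases x; simp [m4Mul, m4Id]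

theorem m4Mul_assoc (x y z : M4) : m4Mul (m4Mul x y) z = m4Mul x (m4Mul y z) := by
  cases x; cases y; cases z
  simp only [m4Mul, M4.mk.injEq]
  refine ⟨?_,?_,?_,?_,?_,?_,?_,?_,?_,?_,?_,?_,?_,?_,?_,?_⟩ <;> ring

theorem m4Pow_sq (m : M4) (k : Nat) : m4Pow (m4Mul m m) k = m4Pow m (2 * k) := by
  induction k with
  | zero => rfl
  | succ k ih =>
    have h2 : 2 * (k + 1) = 2 * k + 1 + 1 := by ring
    rw [h2]
    simp only [m4Pow, ih, m4Mul_assoc]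

theorem m4PowAux_eq (fuel : Nat) : ∀ e r m, e ≤ fuel → m4PowAux fuel r m e = m4Mul r (m4Pow m e) := by
  induction fuel with
  | zero =>
    intro e r m he
    interval_cases e
    simp [m4PowAux, m4Pow, m4Mul_id_right]
  | succ fuel ih =>
    intro e r m he
    by_cases h0 : e = 0
    · simp [h0, m4PowAux, m4Pow, m4Mul_id_right]
    · have hdiv : e / 2 < e := Nat.div_lt_self (Nat.pos_of_ne_zero h0) (by omega)
      rw [m4PowAux]
      simp only [if_neg h0]
      have hle : e / 2 ≤ fuel := by omega
      rw [ih (e / 2) _ _ hle, m4Pow_sq]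
      rcases Nat.mod_two_eq_zero_or_one e with hpar | hpar
      · have h2 : 2 * (e / 2) = e := by omega
        rw [if_neg (show ¬ e % 2 = 1 by omega), h2]
      · have h1 : e % 2 = 1 := by omega
        have h2 : e = 2 * (e / 2) + 1 := by omega
        rw [if_pos h1]
        conv_rhs => rw [h2]
        simp only [m4Pow, m4Mul_assoc]

theorem m4Pow_rows (e : Nat) :
    ((m4Pow m4M e).a * 4 + (m4Pow m4M e).b * 2 + (m4Pow m4M e).c + (m4Pow m4M e).d = q (e + 3)) ∧
    ((m4Pow m4M e).e * 4 + (m4Pow m4M e).f * 2 + (m4Pow m4M e).g + (m4Pow m4M e).h = q (e + 2)) ∧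
    ((m4Pow m4M e).i * 4 + (m4Pow m4M e).j * 2 + (m4Pow m4M e).k + (m4Pow m4M e).l = q (e + 1)) ∧
    ((m4Pow m4M e).m * 4 + (m4Pow m4M e).n * 2 + (m4Pow m4M e).o + (m4Pow m4M e).p = q e) := by
  induction e with
  | zero => refine ⟨?_, ?_, ?_, ?_⟩ <;> decide
  | succ e ih =>
    obtain ⟨h1, h2, h3, h4⟩ := ih
    have hq : q (e + 1 + 3) = q (e + 3) + q (e + 2) + q (e + 1) + q e := rfl
    simp only [m4Pow]
    generalize m4Pow m4M e = w at h1 h2 h3 h4 ⊢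
    refine ⟨?_, ?_, ?_, ?_⟩ <;> simp only [m4Mul, m4M]
    · linear_combination h1 + h2 + h3 + h4 - hq
    · rw [show e + 1 + 2 = e + 3 from rfl]; linear_combination h1
    · rw [show e + 1 + 1 = e + 2 from rfl]; linear_combination h2
    · linear_combination h3

theorem loopA (k : Nat) :
    (PySem.List.pyRange 4 (4 + (k : Int)) 1).foldl aStep (2, 1, 1, 4, 8) =
      (q (k + 2), q (k + 1), q k, q (k + 3), q (k + 4)) := by
  induction k with
  | zero =>
    rw [show (4 + ((0 : Nat) : Int)) = 4 from by norm_num, PySem.List.pyRange_one_eq_nil le_rfl]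
    decide
  | succ k ih =>
    have hb : (4 + ((k + 1 : Nat) : Int)) = (4 + (k : Int)) + 1 := by push_cast; ring
    rw [hb, PySem.List.pyRange_one_succ_right (by omega), List.foldl_append, ih]
    simp only [List.foldl, aStep]
    have hq5 : q (k + 1 + 4) = q (k + 4) + q (k + 3) + q (k + 2) + q (k + 1) := rfl
    have hq4 : q (k + 4) = q (k + 3) + q (k + 2) + q (k + 1) + q k := rfl
    refine Prod.ext rfl (Prod.ext rfl (Prod.ext rfl (Prod.ext rfl ?_)))
    simp only
    rw [hq5, hq4]; ring

-- ===== VERDICT (by name: the statement is the Claim_ definition above) =====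
theorem graduation_ceremony_spec : Claim_equal_graduation_ceremony := by
  intro day _hdom hpre
  unfold Spec_graduation_ceremony
  by_cases h0 : day = 0
  · simp [graduation_ceremony, graduation_ceremony_alt, h0]
  · have hp : 0 ≤ day := hpre
    have h1 : 1 ≤ day := by omega
    by_cases h4 : day < 4
    · interval_cases day <;> decide
    · obtain ⟨k, rfl⟩ : ∃ k : Nat, day = 4 + (k : Int) :=
        ⟨(day - 4).toNat, by omega⟩
      rw [graduation_ceremony, graduation_ceremony_alt]
      rw [if_pos h0, if_neg h4, if_neg h0]
      have hrange : (4 + (k : Int)) + 1 = 4 + ((k + 1 : Nat) : Int) := by push_cast; ring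
      have he : ((4 + (k : Int)) - 1).toNat = k + 3 := by omega
      dsimp only
      rw [hrange, loopA (k + 1), he, m4PowAux_eq (k + 3) (k + 3) m4Id m4M le_rfl, m4Mul_id_left]
      dsimp only
      obtain ⟨_, h2, h3, h4'⟩ := m4Pow_rows (k + 3)
      rw [h2, h3]
      have hnum : q (k + 1) + q (k + 1 + 1) + q (k + 1 + 2) = q (k + 3 + 2) - q (k + 3 + 1) := by
        have hq1 : q (k + 5) = q (k + 4) + q (k + 3) + q (k + 2) + q (k + 1) := rfl
        have hq2 : q (k + 4) = q (k + 3) + q (k + 2) + q (k + 1) + q k := rfl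
        simp only [show k + 1 + 2 = k + 3 from rfl, show k + 1 + 1 = k + 2 from rfl,
          show k + 3 + 2 = k + 5 from rfl, show k + 3 + 1 = k + 4 from rfl]
        omega
      rw [show q (k + 1 + 4) = q (k + 3 + 2) from rfl, hnum]
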